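-- pv_equiv track=rewrite | github.com/sivajyothipravallika/DSA_Python | Lists/immediate_smaller.py | immediate_smaller
-- ===== SOURCE A (Python) =====
-- def immediate_smaller(arr,x):
--     '''
--     Function that gets the number smaller than the given input 'x' and returns the immediate number to 'x'
--     '''
--     l = []
--     for num in arr:
--         if x > num:
--             l.append(num)
--
--     if len(l) == 0:
--         return -1
--     else:
--         return max(l)
-- ===== SOURCE B (Python) =====
-- def _bisect_left(s, x):
--     lo, hi = 0, len(s)
--     while lo < hi:
--         mid = (lo + hi) // 2
--         if s[mid] < x:
--             lo = mid + 1
--         else: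
--             hi = mid
--     return lo
--
--
-- def immediate_smaller(arr, x):
--     s = sorted(arr)
--     i = _bisect_left(s, x)
--     return -1 if i == 0 else s[i - 1]
-- ===== Notes on version B (the rewrite author's own statement) =====
-- stated objective: alternative
-- what changed: Replaces the filter-then-max scan with sort-a-copy plus a hand-written binary search (bisect_left): the answer is the element just before x's insertion point in the sorted copy, or -1 if that point is 0.
import Mathlib
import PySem

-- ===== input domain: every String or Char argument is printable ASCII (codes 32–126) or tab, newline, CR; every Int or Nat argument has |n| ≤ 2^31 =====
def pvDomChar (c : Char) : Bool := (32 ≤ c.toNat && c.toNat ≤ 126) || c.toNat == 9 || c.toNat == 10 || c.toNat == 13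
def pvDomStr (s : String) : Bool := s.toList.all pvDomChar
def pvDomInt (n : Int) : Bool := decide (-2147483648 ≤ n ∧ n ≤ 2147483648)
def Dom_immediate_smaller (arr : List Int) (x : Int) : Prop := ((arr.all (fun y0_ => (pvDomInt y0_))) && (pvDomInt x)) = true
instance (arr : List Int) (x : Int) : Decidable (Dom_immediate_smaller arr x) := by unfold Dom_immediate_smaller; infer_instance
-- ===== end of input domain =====

-- B replaces A's filter-then-max scan by sorting a copy and binary-searching x's
-- insertion point (alternative algorithm; return values proved equal on all inputs).

-- ===== PORT A =====
def immediate_smaller (arr : List Int) (x : Int) : Int :=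
  let l := arr.foldl (fun l num => if x > num then l ++ [num] else l) []
  if l.length = 0 then -1
  else (PySem.List.max? l (fun y => y)).getD 0

-- ===== PORT B =====
def immediate_smaller_alt (arr : List Int) (x : Int) : Int :=
  let s := PySem.List.sorted arr (fun v => v) false
  let i := PySem.List.bisectLeft s x
  if i = 0 then -1 else s.getD (i - 1) 0

-- ===== PRECONDITION & SPEC =====
def Spec_immediate_smaller (arr : List Int) (x : Int) (out : Int) : Prop := out = immediate_smaller_alt arr x
instance (arr : List Int) (x : Int) (out : Int) : Decidable (Spec_immediate_smaller arr x out) := by unfold Spec_immediate_smaller; infer_instance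

-- ===== CLAIM (what is proved, stated in full; the proofs are below) =====
def Claim_equal_immediate_smaller : Prop := ∀ (arr : List Int) (x : Int), Dom_immediate_smaller arr x → Spec_immediate_smaller arr x (immediate_smaller arr x)

-- ===== LEMMAS AND PROOFS =====

theorem immediate_smaller_agree (arr : List Int) (x : Int) :
    immediate_smaller arr x = immediate_smaller_alt arr x := by
  unfold immediate_smaller immediate_smaller_alt
  set s : List Int := PySem.List.sorted arr (fun v => v) false with hs
  have hperm : s.Perm arr := PySem.List.sorted_perm arr (fun v => v) false
  have hpair : s.Pairwise (fun a b => a ≤ b) := PySem.List.sorted_pairwise arr (fun v => v)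
  set i : Nat := PySem.List.bisectLeft s x with hi
  obtain ⟨hile, hlt, hge⟩ := PySem.List.bisectLeft_spec s x hpair
  have hfold : arr.foldl (fun l num => if x > num then l ++ [num] else l) ([] : List Int)
      = arr.filter (fun num => decide (x > num)) := by
    simpa using PySem.List.foldl_append_if_eq_filter (fun num => decide (x > num)) arr []
  simp only [hfold]
  set l : List Int := arr.filter (fun num => decide (x > num)) with hl
  have hmem_l : ∀ y : Int, y ∈ l ↔ (y ∈ arr ∧ y < x) := by
    intro y; simp [hl]
  by_cases hnil : l = []
  · -- no element of arr is < x, so i = 0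
    have hnone : ∀ y ∈ arr, ¬ y < x := by
      intro y hy hyx
      have : y ∈ l := (hmem_l y).2 ⟨hy, hyx⟩
      simp [hnil] at this
    have hi0 : i = 0 := by
      by_contra h0
      have hpos : 0 < i := Nat.pos_of_ne_zero h0
      have h0len : 0 < s.length := lt_of_lt_of_le hpos hile
      have := hlt 0 h0len hpos
      exact hnone s[0] (hperm.mem_iff.mp (s.getElem_mem h0len)) this
    simp [hnil, ← hi, hi0]
  · -- l nonempty: i > 0 and s[i-1] is the max of l
    -- index of any y ∈ arr with y < x lies strictly below i
    have hidx_lt : ∀ (j : Nat) (hj : j < s.length), s[j] < x → j < i := by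
      intro j hj hjx
      by_contra h
      exact absurd hjx (not_lt.mpr (hge j hj (le_of_not_gt h)))
    have hipos : 0 < i := by
      obtain ⟨a, ha⟩ := List.exists_mem_of_ne_nil l hnil
      obtain ⟨haarr, hax⟩ := (hmem_l a).1 ha
      obtain ⟨j, hj, hja⟩ := List.mem_iff_getElem.mp (hperm.mem_iff.mpr haarr)
      have : j < i := hidx_lt j hj (by rw [hja]; exact hax)
      omega
    have hi1 : i - 1 < s.length := by omega
    have hsi_lt : s[i-1] < x := hlt (i-1) hi1 (by omega)
    have hsi_mem : s[i-1] ∈ l := (hmem_l _).2 ⟨hperm.mem_iff.mp (s.getElem_mem hi1), hsi_lt⟩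
    -- s[i-1] dominates every element of l
    have hdom : ∀ y ∈ l, y ≤ s[i-1] := by
      intro y hy
      obtain ⟨hyarr, hyx⟩ := (hmem_l y).1 hy
      obtain ⟨j, hj, hjy⟩ := List.mem_iff_getElem.mp (hperm.mem_iff.mpr hyarr)
      have hji : j < i := hidx_lt j hj (by rw [hjy]; exact hyx)
      have hmono : s[j] ≤ s[i-1] := by
        have := PySem.List.sorted_id_getElem_mono arr (p := j) (q := i-1) (by omega) (by simpa [hs] using hi1)
        simpa [hs] using this
      rw [← hjy]; exact hmono
    -- A's max over l equals s[i-1]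
    obtain ⟨a, t, hat⟩ := List.exists_cons_of_ne_nil hnil
    obtain ⟨m, hm⟩ : ∃ m, PySem.List.max? l (fun y => y) = some m := by
      cases hmx : PySem.List.max? l (fun y => y) with
      | none => exact absurd ((PySem.List.max?_eq_none_iff l _).mp hmx) hnil
      | some m => exact ⟨m, rfl⟩
    have hm_le : m ≤ s[i-1] := hdom m (PySem.List.max?_mem hm)
    have hle_m : s[i-1] ≤ m := PySem.List.max?_isMax hm _ hsi_mem
    have hlen0 : ¬ l.length = 0 := by simp [hat]
    have hi0 : ¬ i = 0 := by omega
    have hB : s.getD (i-1) 0 = s[i-1] := List.getD_eq_getElem s 0 hi1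
    simp only [hlen0, if_false, ← hi, hi0, hm, Option.getD_some, hB]
    omega

-- ===== VERDICT (by name: the statement is the Claim_ definition above) =====
theorem immediate_smaller_spec : Claim_equal_immediate_smaller := by
  intro arr x _
  unfold Spec_immediate_smaller
  exact immediate_smaller_agree arr x
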